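-- pv_equiv track=rewrite | github.com/chefkoch24/floorball-stats | src/social_media/render_top10_playoff_scorers_carousel.py | _country_abbr
-- ===== SOURCE A (Python) =====
-- def _country_abbr(league: str, season: str) -> str:
--     mapping = {
--         "Germany": "DE",
--         "Switzerland": "CH",
--         "Czech Republic": "CZ",
--         "Finland": "FI",
--         "Latvia": "LV",
--         "Sweden": "SE",
--         "Slovakia": "SK",
--     }
--     if league in mapping:
--         return mapping[league]
--     lower = (season or "").lower()
--     for prefix, abbr in {
--         "ch-": "CH",
--         "cz-": "CZ",
--         "fi-": "FI",
--         "lv-": "LV",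
--         "se-": "SE",
--         "sk-": "SK",
--     }.items():
--         if lower.startswith(prefix):
--             return abbr
--     return "DE"
-- ===== SOURCE B (Python) =====
-- _MAPPING = {
--     "Germany": "DE",
--     "Switzerland": "CH",
--     "Czech Republic": "CZ",
--     "Finland": "FI",
--     "Latvia": "LV",
--     "Sweden": "SE",
--     "Slovakia": "SK",
-- }
--
-- _PREFIX = {
--     "ch-": "CH",
--     "cz-": "CZ",
--     "fi-": "FI",
--     "lv-": "LV",
--     "se-": "SE",
--     "sk-": "SK",
-- }
--
--
-- def _country_abbr(league: str, season: str) -> str: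
--     if league in _MAPPING:
--         return _MAPPING[league]
--     key = (season or "").lower()[:3]
--     return _PREFIX.get(key, "DE")
-- ===== Notes on version B (the rewrite author's own statement) =====
-- stated objective: idiomatic
-- what changed: Replaced the loop that scans six prefixes with startswith by a single lookup of the lowercased season's 3-character prefix in a prefix-keyed dict with .get(key, 'DE').
import Mathlib
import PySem

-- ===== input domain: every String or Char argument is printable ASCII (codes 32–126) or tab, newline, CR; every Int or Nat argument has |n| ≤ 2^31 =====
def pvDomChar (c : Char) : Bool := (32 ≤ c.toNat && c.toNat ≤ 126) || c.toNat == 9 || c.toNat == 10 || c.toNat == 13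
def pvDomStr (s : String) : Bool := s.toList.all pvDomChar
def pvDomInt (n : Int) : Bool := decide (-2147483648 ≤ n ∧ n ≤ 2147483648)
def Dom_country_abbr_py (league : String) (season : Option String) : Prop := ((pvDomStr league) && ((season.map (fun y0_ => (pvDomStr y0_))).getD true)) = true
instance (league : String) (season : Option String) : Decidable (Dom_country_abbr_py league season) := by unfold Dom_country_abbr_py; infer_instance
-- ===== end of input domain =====

-- B replaces A's prefix-scanning loop with a prefix table keyed by the lowercased season's first three characters (idiomatic; same cost).


-- ===== PORT A =====
def pvMappingA : PySem.Dict String String := PySem.Dict.ofList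
  [("Germany", "DE"), ("Switzerland", "CH"), ("Czech Republic", "CZ"),
   ("Finland", "FI"), ("Latvia", "LV"), ("Sweden", "SE"), ("Slovakia", "SK")]

def country_abbr_py (league : String) (season : Option String) : String :=
  match pvMappingA.get? league with
  | some v => v
  | none =>
    let lower := PySem.Str.lower (season.getD "")
    if PySem.Str.startswith lower "ch-" then "CH"
    else if PySem.Str.startswith lower "cz-" then "CZ"
    else if PySem.Str.startswith lower "fi-" then "FI"
    else if PySem.Str.startswith lower "lv-" then "LV"
    else if PySem.Str.startswith lower "se-" then "SE"
    else if PySem.Str.startswith lower "sk-" then "SK"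
    else "DE"

-- ===== PORT B =====
def pvMappingB : PySem.Dict String String := PySem.Dict.ofList
  [("Germany", "DE"), ("Switzerland", "CH"), ("Czech Republic", "CZ"),
   ("Finland", "FI"), ("Latvia", "LV"), ("Sweden", "SE"), ("Slovakia", "SK")]

def pvPrefixMap : PySem.Dict String String := PySem.Dict.ofList
  [("ch-", "CH"), ("cz-", "CZ"), ("fi-", "FI"), ("lv-", "LV"), ("se-", "SE"), ("sk-", "SK")]

def country_abbr_py_alt (league : String) (season : Option String) : String :=
  match pvMappingB.get? league with
  | some v => v
  | none =>
    let key := PySem.Str.slice (PySem.Str.lower (season.getD "")) none (some 3)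
    pvPrefixMap.getD key "DE"

-- ===== PRECONDITION & SPEC =====
def Spec_country_abbr_py (league : String) (season : Option String) (out : String) : Prop := out = country_abbr_py_alt league season
instance (league : String) (season : Option String) (out : String) : Decidable (Spec_country_abbr_py league season out) := by unfold Spec_country_abbr_py; infer_instance

-- ===== CLAIM (what is proved, stated in full; the proofs are below) =====
def Claim_equal_country_abbr_py : Prop := ∀ (league : String) (season : Option String), Dom_country_abbr_py league season → Spec_country_abbr_py league season (country_abbr_py league season)

-- ===== LEMMAS AND PROOFS =====

-- startswith with a 3-character prefix tests equality of the first-3-characters slice with that prefix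
theorem pv_sw3 (s p : String) (hp : p.toList.length = 3) :
    PySem.Str.startswith s p = true ↔ PySem.Str.slice s none (some 3) = p := by
  rw [PySem.Str.startswith_eq, PySem.Chars.startswith_iff]
  have hsl : (PySem.Str.slice s none (some 3)).toList = s.toList.take 3 := by
    rw [PySem.Str.toList_slice, PySem.Chars.slice_eq_listSlice]
    exact_mod_cast PySem.List.slice_to_natCast (xs := s.toList) (b := 3)
  constructor
  · intro h
    apply String.toList_inj.mp
    rw [hsl, ← hp]
    exact (List.prefix_iff_eq_take.mp h).symm
  · intro h
    have h3 : s.toList.take 3 = p.toList := by rw [← hsl, h]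
    rw [List.prefix_iff_eq_take, hp]
    exact h3.symm

-- ===== VERDICT (by name: the statement is the Claim_ definition above) =====
theorem country_abbr_py_spec : Claim_equal_country_abbr_py := by
  intro league season _
  unfold Spec_country_abbr_py country_abbr_py country_abbr_py_alt
  have hm : pvMappingA.get? league = pvMappingB.get? league := rfl
  rw [hm]
  cases h : pvMappingB.get? league with
  | some v => rfl
  | none =>
    simp only
    have e1 := pv_sw3 (PySem.Str.lower (season.getD "")) "ch-" (by decide)
    have e2 := pv_sw3 (PySem.Str.lower (season.getD "")) "cz-" (by decide)
    have e3 := pv_sw3 (PySem.Str.lower (season.getD "")) "fi-" (by decide)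
    have e4 := pv_sw3 (PySem.Str.lower (season.getD "")) "lv-" (by decide)
    have e5 := pv_sw3 (PySem.Str.lower (season.getD "")) "se-" (by decide)
    have e6 := pv_sw3 (PySem.Str.lower (season.getD "")) "sk-" (by decide)
    have hpm : pvPrefixMap = ((((((PySem.Dict.empty.insert "ch-" "CH").insert "cz-" "CZ").insert
        "fi-" "FI").insert "lv-" "LV").insert "se-" "SE").insert "sk-" "SK") := by decide
    rw [hpm]
    simp only [PySem.Dict.getD_insert, PySem.Dict.getD_empty, e1, e2, e3, e4, e5, e6]
    split_ifs <;> simp_all
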